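-- pv_equiv track=rewrite | github.com/MJDEVGG/Codm | Tools.py | extract_accounts_v2
-- ===== SOURCE A (Python) =====
-- def extract_accounts_v2(lines):
--     accounts = []
--     current = {}
--     for line in lines:
--         line = line.strip()
--         if not line:
--             if current:
--                 accounts.append(current)
--                 current = {}
--             continue
--         if ":" in line:
--             key, val = line.split(":", 1)
--             current[key.strip()] = val.strip()
--     if current:
--         accounts.append(current)
--     return accounts
-- ===== SOURCE B (Python) =====
-- def _parse_block(group):
--     d = {}
--     for s in group:
--         if ":" in s:
--             k, v = s.split(":", 1)
--             d[k.strip()] = v.strip()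
--     return d
--
--
-- def extract_accounts_v2(lines):
--     # Phase 1: partition stripped lines into blank-separated groups.
--     groups, cur = [], []
--     for line in lines:
--         s = line.strip()
--         if s:
--             cur.append(s)
--         elif cur:
--             groups.append(cur)
--             cur = []
--     if cur:
--         groups.append(cur)
--     # Phase 2: parse each group into a dict; keep only non-empty dicts.
--     return [d for d in map(_parse_block, groups) if d]
-- ===== Notes on version B (the rewrite author's own statement) =====
-- stated objective: simpler
-- what changed: Replaces the inline state machine that interleaves dict-building with blank-line flushing by a two-phase pipeline: first group lines into blank-separated blocks, then map each block to a dict and keep the non-empty ones.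
import Mathlib
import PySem

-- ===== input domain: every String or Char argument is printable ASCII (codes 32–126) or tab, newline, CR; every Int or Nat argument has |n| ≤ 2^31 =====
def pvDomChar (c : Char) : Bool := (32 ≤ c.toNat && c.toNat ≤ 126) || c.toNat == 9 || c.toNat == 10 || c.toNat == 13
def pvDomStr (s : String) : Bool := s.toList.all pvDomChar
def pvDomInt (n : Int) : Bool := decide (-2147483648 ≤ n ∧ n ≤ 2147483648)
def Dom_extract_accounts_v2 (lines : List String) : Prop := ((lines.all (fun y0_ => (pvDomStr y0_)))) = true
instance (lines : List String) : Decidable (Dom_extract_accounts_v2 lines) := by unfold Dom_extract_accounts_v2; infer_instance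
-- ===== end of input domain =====

-- B replaces A's inline state machine by a group-then-parse pipeline (objective: simpler).

-- ===== PORT A =====
-- one loop iteration of A: state = (accounts, current dict)
def pvStepA (st : List (List (String × String)) × PySem.Dict String String) (line : String) :
    List (List (String × String)) × PySem.Dict String String :=
  let s := PySem.Str.strip line
  if s = "" then
    if st.2.items = [] then st else (st.1 ++ [st.2.items], PySem.Dict.empty)
  else if PySem.Str.isIn ":" s then
    match PySem.Str.splitMax? s ":" 1 with
    | some (k :: v :: _) => (st.1, st.2.insert (PySem.Str.strip k) (PySem.Str.strip v))
    | _ => st  -- unreachable: ":" ∈ s gives exactly two pieces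
  else st

def extract_accounts_v2 (lines : List String) : List (List (String × String)) :=
  let st := lines.foldl pvStepA ([], PySem.Dict.empty)
  if st.2.items = [] then st.1 else st.1 ++ [st.2.items]

-- ===== PORT B =====
-- phase 1: blank-separated groups of stripped lines
def pvGroupStep (st : List (List String) × List String) (line : String) :
    List (List String) × List String :=
  let s := PySem.Str.strip line
  if s ≠ "" then (st.1, st.2 ++ [s])
  else if st.2 ≠ [] then (st.1 ++ [st.2], [])
  else st

def pvGroups (lines : List String) : List (List String) :=
  let st := lines.foldl pvGroupStep ([], [])
  if st.2 ≠ [] then st.1 ++ [st.2] else st.1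

-- phase 2: one group → dict
def pvParseBlock (g : List String) : PySem.Dict String String :=
  g.foldl (fun d s =>
    if PySem.Str.isIn ":" s then
      match PySem.Str.splitMax? s ":" 1 with
      | some (k :: v :: _) => d.insert (PySem.Str.strip k) (PySem.Str.strip v)
      | _ => d
    else d) PySem.Dict.empty

def extract_accounts_v2_alt (lines : List String) : List (List (String × String)) :=
  (((pvGroups lines).map (fun g => (pvParseBlock g).items)).filter (fun d => d ≠ []))

-- ===== PRECONDITION & SPEC =====
def Spec_extract_accounts_v2 (lines : List String) (out : List (List (String × String))) : Prop := out = extract_accounts_v2_alt lines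
instance (lines : List String) (out : List (List (String × String))) : Decidable (Spec_extract_accounts_v2 lines out) := by unfold Spec_extract_accounts_v2; infer_instance

-- ===== CLAIM (what is proved, stated in full; the proofs are below) =====
def Claim_equal_extract_accounts_v2 : Prop := ∀ (lines : List String), Dom_extract_accounts_v2 lines → Spec_extract_accounts_v2 lines (extract_accounts_v2 lines)

-- ===== LEMMAS AND PROOFS =====

-- B's filtered-map applied to a state (groups, current group)
def pvFinishB (gaccs : List (List String)) (gcur : List String) : List (List (String × String)) :=
  ((if gcur ≠ [] then gaccs ++ [gcur] else gaccs).map (fun g => (pvParseBlock g).items)).filter (fun d => d ≠ [])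

lemma pvParseBlock_append (g : List String) (s : String) :
    pvParseBlock (g ++ [s]) =
      (if PySem.Str.isIn ":" s then
        match PySem.Str.splitMax? s ":" 1 with
        | some (k :: v :: _) => (pvParseBlock g).insert (PySem.Str.strip k) (PySem.Str.strip v)
        | _ => pvParseBlock g
      else pvParseBlock g) := by
  simp [pvParseBlock, List.foldl_append]

lemma pvInvariant (lines : List String) :
    ∀ (accs : List (List (String × String))) (gaccs : List (List String)) (gcur : List String)
      (cur : PySem.Dict String String),
      accs = ((gaccs.map (fun g => (pvParseBlock g).items)).filter (fun d => d ≠ [])) →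
      cur = pvParseBlock gcur →
      (let st := lines.foldl pvStepA (accs, cur)
       if st.2.items = [] then st.1 else st.1 ++ [st.2.items]) =
      (let st := lines.foldl pvGroupStep (gaccs, gcur)
       pvFinishB st.1 st.2) := by
  induction lines with
  | nil =>
    intro accs gaccs gcur cur haccs hcur
    subst haccs hcur
    simp only [List.foldl_nil, pvFinishB]
    by_cases hg : gcur = []
    · subst hg
      simp [pvParseBlock, PySem.Dict.empty]
    · simp only [hg, ne_eq, not_false_eq_true, if_true, List.map_append, List.filter_append,
        List.map_cons, List.map_nil, List.filter_cons, List.filter_nil]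
      by_cases hi : (pvParseBlock gcur).items = []
      · simp [hi]
      · simp [hi]
  | cons line rest ih =>
    intro accs gaccs gcur cur haccs hcur
    simp only [List.foldl_cons]
    by_cases hs : PySem.Str.strip line = ""
    · -- blank line
      by_cases hg : gcur = []
      · -- empty group ⇒ empty dict ⇒ neither side flushes
        have hcur' : cur.items = [] := by subst hcur hg; rfl
        have hA : pvStepA (accs, cur) line = (accs, cur) := by
          simp [pvStepA, hs, hcur']
        have hB : pvGroupStep (gaccs, gcur) line = (gaccs, gcur) := by
          simp [pvGroupStep, hs, hg]
        rw [hA, hB]; exact ih accs gaccs gcur cur haccs hcur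
      · have hB : pvGroupStep (gaccs, gcur) line = (gaccs ++ [gcur], []) := by
          simp [pvGroupStep, hs, hg]
        rw [hB]
        by_cases hi : cur.items = []
        · -- A keeps state; B flushes a group whose dict is empty (filtered out)
          have hA : pvStepA (accs, cur) line = (accs, cur) := by
            simp [pvStepA, hs, hi]
          rw [hA]
          refine ih accs (gaccs ++ [gcur]) [] cur ?_ ?_
          · rw [haccs]
            have : (pvParseBlock gcur).items = [] := by rw [← hcur]; exact hi
            simp [this]
          · apply PySem.Dict.ext; rw [hi]; rfl
        · -- both flush
          have hA : pvStepA (accs, cur) line = (accs ++ [cur.items], PySem.Dict.empty) := by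
            simp [pvStepA, hs, hi]
          rw [hA]
          refine ih (accs ++ [cur.items]) (gaccs ++ [gcur]) [] PySem.Dict.empty ?_ rfl
          rw [haccs, hcur]
          have : (pvParseBlock gcur).items ≠ [] := by rw [← hcur]; exact hi
          simp [this]
    · -- non-blank line: A updates cur (maybe), B appends the stripped line to gcur
      have hB : pvGroupStep (gaccs, gcur) line = (gaccs, gcur ++ [PySem.Str.strip line]) := by
        simp [pvGroupStep, hs]
      rw [hB]
      by_cases hc : PySem.Str.isIn ":" (PySem.Str.strip line) = true
      case pos =>
        have hcC : PySem.Chars.isIn [':'] (PySem.Chars.strip line.toList) = true := by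
          simpa using hc
        cases hsp : PySem.Str.splitMax? (PySem.Str.strip line) ":" 1 with
        | none =>
          have hA : pvStepA (accs, cur) line = (accs, cur) := by
            simp [pvStepA, hs, hcC, hsp]
          rw [hA]
          refine ih accs gaccs (gcur ++ [PySem.Str.strip line]) cur haccs ?_
          rw [pvParseBlock_append]
          simp [hcC, hsp, hcur]
        | some parts =>
          match parts with
          | [] =>
            have hA : pvStepA (accs, cur) line = (accs, cur) := by
              simp [pvStepA, hs, hcC, hsp]
            rw [hA]
            refine ih accs gaccs (gcur ++ [PySem.Str.strip line]) cur haccs ?_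
            rw [pvParseBlock_append]; simp [hcC, hsp, hcur]
          | [k] =>
            have hA : pvStepA (accs, cur) line = (accs, cur) := by
              simp [pvStepA, hs, hcC, hsp]
            rw [hA]
            refine ih accs gaccs (gcur ++ [PySem.Str.strip line]) cur haccs ?_
            rw [pvParseBlock_append]; simp [hcC, hsp, hcur]
          | k :: v :: tl =>
            have hA : pvStepA (accs, cur) line =
                (accs, cur.insert (PySem.Str.strip k) (PySem.Str.strip v)) := by
              simp [pvStepA, hs, hcC, hsp]
            rw [hA]
            refine ih accs gaccs (gcur ++ [PySem.Str.strip line]) _ haccs ?_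
            rw [pvParseBlock_append]; simp [hcC, hsp, hcur]
      case neg =>
        have hc' : PySem.Chars.isIn [':'] (PySem.Chars.strip line.toList) = false := by
          simpa using hc
        have hA : pvStepA (accs, cur) line = (accs, cur) := by
          simp [pvStepA, hs, hc']
        rw [hA]
        refine ih accs gaccs (gcur ++ [PySem.Str.strip line]) cur haccs ?_
        rw [pvParseBlock_append]; simp [hc', hcur]

-- ===== VERDICT (by name: the statement is the Claim_ definition above) =====
theorem extract_accounts_v2_spec : Claim_equal_extract_accounts_v2 := by
  intro lines _
  show extract_accounts_v2 lines = extract_accounts_v2_alt lines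
  have h := pvInvariant lines [] [] [] PySem.Dict.empty (by rfl) (by rfl)
  simpa [extract_accounts_v2, extract_accounts_v2_alt, pvGroups, pvFinishB] using h
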